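-- pv_equiv track=rewrite | github.com/mrbell/advent_of_code | 2023/day12.py | fill_broken_faster
-- ===== SOURCE A (Python) =====
-- from typing import List, Tuple
--
-- def fill_broken_faster(spring_map: str, broken_spring_pattern: Tuple[int]) -> List[str]:
--     if '?' not in spring_map:
--         if matches_pattern(spring_map, broken_spring_pattern):
--             return [spring_map]
--         else:
--             return []
--
--     possibilities = []
--     pattern_number = 0
--     found_group = False
--     group_count = 0
--
--     for i, char in enumerate(spring_map):
--         if char == '#':
--             found_group = True
--             group_count += 1
--         elif char == '.' and found_group:
--             if pattern_number >= len(broken_spring_pattern) or group_count != broken_spring_pattern[pattern_number]: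
--                 break
--             pattern_number += 1
--             found_group = False
--             group_count = 0
--         elif char == '?':
--             for c in '#.':
--                 new_possibilities = fill_broken_faster(spring_map[:i] + c + spring_map[i+1:], broken_spring_pattern)
--                 possibilities.extend(new_possibilities)
--             break
--     return possibilities
--
-- def matches_pattern(spring_map: str, broken_spring_pattern: List[int]) -> bool:
--     map_pattern = []
--     group_found = False
--     group_count = 0
--     for i, char in enumerate(spring_map):
--         if char == '#':
--             group_found = True
--             group_count += 1
--         elif char == '.' and group_found:
--             map_pattern.append(group_count)
--             group_found = False
--             group_count = 0
--     if group_found: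
--         map_pattern.append(group_count)
--     return len(map_pattern) == len(broken_spring_pattern) and all([x == y for x, y in zip(map_pattern, broken_spring_pattern)])
-- ===== SOURCE B (Python) =====
-- from typing import List, Tuple
--
-- def fill_broken_faster(spring_map: str, broken_spring_pattern: Tuple[int]) -> List[str]:
--     # One left-to-right pass threading (remaining pattern, current '#'-run); the '?'-free
--     # segment ahead is consumed by an incremental loop (pruning as soon as a closed group
--     # mismatches), and recursion happens only at a '?': no per-node string rebuild, no
--     # prefix re-scan, no final matches_pattern pass.
--     n = len(spring_map)
--
--     def go(i, pat, run):
--         # consume the '?'-free segment starting at i, threading (pat, run)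
--         j = i
--         while j < n and spring_map[j] != '?':
--             c = spring_map[j]
--             if c == '#':
--                 run += 1
--             elif c == '.' and run > 0:
--                 if not pat or pat[0] != run:
--                     return []
--                 pat = pat[1:]
--                 run = 0
--             j += 1
--         seg = spring_map[i:j]
--         if j == n:
--             if run > 0:
--                 return [seg] if list(pat) == [run] else []
--             return [seg] if not pat else []
--         out = []
--         for c in '#.':
--             if c == '#':
--                 tails = go(j + 1, pat, run + 1)
--             elif run > 0:
--                 tails = [] if (not pat or pat[0] != run) else go(j + 1, pat[1:], 0)
--             else:
--                 tails = go(j + 1, pat, 0)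
--             out.extend(seg + c + t for t in tails)
--         return out
--
--     return go(0, tuple(broken_spring_pattern), 0)
-- ===== Notes on version B (the rewrite author's own statement) =====
-- stated objective: alternative
-- what changed: B threads the parsing state (remaining pattern groups, current '#'-run) through one left-to-right recursion that branches only at '?' and prepends each consumed segment to the suffix completions, instead of A's rebuilding the whole string at each '?' node, re-scanning the prefix from index 0 at every recursion level, and running a final matches_pattern pass at each leaf.
import Mathlib
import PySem

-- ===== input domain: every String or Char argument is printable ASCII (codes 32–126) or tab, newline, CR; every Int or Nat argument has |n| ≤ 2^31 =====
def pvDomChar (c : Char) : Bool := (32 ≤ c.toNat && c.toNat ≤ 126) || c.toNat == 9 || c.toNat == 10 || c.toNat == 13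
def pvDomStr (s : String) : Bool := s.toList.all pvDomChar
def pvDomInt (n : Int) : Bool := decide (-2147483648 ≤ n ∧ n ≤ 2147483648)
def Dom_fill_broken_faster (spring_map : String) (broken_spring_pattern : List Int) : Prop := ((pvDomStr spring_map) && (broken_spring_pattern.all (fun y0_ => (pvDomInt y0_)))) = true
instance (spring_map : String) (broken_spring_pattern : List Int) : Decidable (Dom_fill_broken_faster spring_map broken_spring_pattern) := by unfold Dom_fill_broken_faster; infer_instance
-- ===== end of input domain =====

-- B threads the parsing state through one recursion that branches only at '?', instead of
-- A's per-node string rebuild, prefix re-scan and final matches_pattern pass (objective: alternative).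

-- ===== PORT A =====
-- Strings are handled as List Char (String.toList / String.ofList at the boundary; exact).

-- matches_pattern's loop: state (map_pattern, group_found, group_count); the trailing
-- 'if group_found: append' is the [] case.
def mpLoop : List Char → List Int → Bool → Int → List Int
  | [], mp, gf, gc => if gf then mp ++ [gc] else mp
  | c :: cs, mp, gf, gc =>
    if c = '#' then mpLoop cs mp true (gc + 1)
    else if c = '.' ∧ gf then mpLoop cs (mp ++ [gc]) false 0
    else mpLoop cs mp gf gc

def matchesB (cs : List Char) (p : List Int) : Bool :=
  let mp := mpLoop cs [] false 0
  mp.length == p.length && (mp.zip p).all (fun xy => xy.1 == xy.2)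

-- A's main loop 'for i, char in enumerate(spring_map)': pre is spring_map[:i], rem the rest,
-- so spring_map[:i] + c + spring_map[i+1:] is pre ++ c :: rest (exact).
mutual
def fillA (cs : List Char) (p : List Int) : List String :=
  if '?' ∉ cs then
    if matchesB cs p then [String.ofList cs] else []
  else
    loopA [] cs p 0 false 0
termination_by (cs.count '?', 1, 0)
decreasing_by all_goals (simp_wf; exact Prod.Lex.right _ (Prod.Lex.left _ _ (by omega)))

def loopA (pre rem : List Char) (p : List Int) (pn : Nat) (fg : Bool) (gc : Int) : List String :=
  match rem with
  | [] => []   -- loop fell off the end: possibilities == []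
  | c :: rest =>
    if c = '#' then
      loopA (pre ++ [c]) rest p pn true (gc + 1)
    else if c = '.' ∧ fg then
      if pn ≥ p.length ∨ gc ≠ p.getD pn 0 then []   -- break
      else loopA (pre ++ [c]) rest p (pn + 1) false 0
    else if c = '?' then
      fillA (pre ++ '#' :: rest) p ++ fillA (pre ++ '.' :: rest) p   -- recurse for '#','.' then break
    else
      loopA (pre ++ [c]) rest p pn fg gc
termination_by ((pre ++ rem).count '?', 0, rem.length)
decreasing_by all_goals
  (simp_wf <;>
   first
   | exact Prod.Lex.right _ (Prod.Lex.right _ (by omega))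
   | (subst_vars; exact Prod.Lex.left _ _ (by simp)))
end

def fill_broken_faster (spring_map : String) (broken_spring_pattern : List Int) : List String :=
  fillA spring_map.toList broken_spring_pattern

-- ===== PORT B =====
-- Source B's go: consume the '?'-free segment (the while loop = scanSeg, which also returns
-- the segment spring_map[i:j]), recurse only at a '?'; index i ↔ the suffix list (exact).
-- Completions are built as List Char (Python's seg + c + t) and turned into String at the top.

-- the while loop of Source B's go: none = the early 'return []'; otherwise
-- (segment consumed, rest of the input, remaining pattern, current run)
def scanSeg : List Char → List Int → Int → Option (List Char × List Char × List Int × Int)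
  | [], pat, run => some ([], [], pat, run)
  | c :: cs, pat, run =>
    if c = '?' then some ([], c :: cs, pat, run)
    else if c = '#' then (scanSeg cs pat (run + 1)).map (fun x => (c :: x.1, x.2))
    else if c = '.' ∧ 0 < run then
      match pat with
      | [] => none
      | q :: ps => if q ≠ run then none else (scanSeg cs ps 0).map (fun x => (c :: x.1, x.2))
    else (scanSeg cs pat run).map (fun x => (c :: x.1, x.2))

theorem scanSeg_eq_append : ∀ (cs : List Char) (pat : List Int) (run : Int)
    (seg rest : List Char) (pat' : List Int) (run' : Int),
    scanSeg cs pat run = some (seg, rest, pat', run') → seg ++ rest = cs := by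
  intro cs
  induction cs with
  | nil => intro pat run seg rest pat' run' h; simp [scanSeg] at h; simp [h.1, h.2.1]
  | cons c cs ih =>
    intro pat run seg rest pat' run' h
    simp only [scanSeg] at h
    split_ifs at h with h1 h2 h3
    · simp at h; simp [h.1, h.2.1]
    · cases hx : scanSeg cs pat (run + 1) with
      | none => rw [hx] at h; simp at h
      | some x =>
        obtain ⟨x1, x2, x3, x4⟩ := x
        rw [hx] at h
        simp only [Option.map_some, Option.some.injEq, Prod.mk.injEq] at h
        obtain ⟨h5, h6, h7, h8⟩ := h
        subst h5; subst h6
        simp [ih pat (run + 1) x1 x2 x3 x4 hx]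
    · cases pat with
      | nil => simp at h
      | cons q ps =>
        dsimp only at h
        split_ifs at h with h4
        · cases hx : scanSeg cs ps 0 with
          | none => rw [hx] at h; simp at h
          | some x =>
            obtain ⟨x1, x2, x3, x4⟩ := x
            rw [hx] at h
            simp only [Option.map_some, Option.some.injEq, Prod.mk.injEq] at h
            obtain ⟨h5, h6, h7, h8⟩ := h
            subst h5; subst h6
            simp [ih ps 0 x1 x2 x3 x4 hx]
    · cases hx : scanSeg cs pat run with
      | none => rw [hx] at h; simp at h
      | some x =>
        obtain ⟨x1, x2, x3, x4⟩ := x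
        rw [hx] at h
        simp only [Option.map_some, Option.some.injEq, Prod.mk.injEq] at h
        obtain ⟨h5, h6, h7, h8⟩ := h
        subst h5; subst h6
        simp [ih pat run x1 x2 x3 x4 hx]

mutual
def goB (cs : List Char) (pat : List Int) (run : Int) : List (List Char) :=
  match h : scanSeg cs pat run with
  | none => []
  | some (seg, [], pat', run') =>
    if run' > 0 then (if pat' = [run'] then [seg] else [])
    else (if pat' = [] then [seg] else [])
  | some (seg, _ :: rest', pat', run') =>
    (stepB '#' rest' pat' run').map (fun t => seg ++ '#' :: t) ++
    (stepB '.' rest' pat' run').map (fun t => seg ++ '.' :: t)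
termination_by (cs.length, 0)
decreasing_by all_goals
  (have hlen := congrArg List.length (scanSeg_eq_append _ _ _ _ _ _ _ h)
   exact Prod.Lex.left _ _ (by simp at hlen; omega))

def stepB (c : Char) (rest : List Char) (pat : List Int) (run : Int) : List (List Char) :=
  if c = '#' then goB rest pat (run + 1)
  else if 0 < run then
    match pat with
    | [] => []
    | q :: ps => if q ≠ run then [] else goB rest ps 0
  else goB rest pat run
termination_by (rest.length, 1)
decreasing_by all_goals exact Prod.Lex.right _ (by omega)
end

def fill_broken_faster_alt (spring_map : String) (broken_spring_pattern : List Int) : List String :=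
  (goB spring_map.toList broken_spring_pattern 0).map String.ofList

-- ===== PRECONDITION & SPEC =====
def Spec_fill_broken_faster (spring_map : String) (broken_spring_pattern : List Int) (out : List String) : Prop := out = fill_broken_faster_alt spring_map broken_spring_pattern
instance (spring_map : String) (broken_spring_pattern : List Int) (out : List String) : Decidable (Spec_fill_broken_faster spring_map broken_spring_pattern out) := by unfold Spec_fill_broken_faster; infer_instance

-- ===== CLAIM (what is proved, stated in full; the proofs are below) =====
def Claim_equal_fill_broken_faster : Prop := ∀ (spring_map : String) (broken_spring_pattern : List Int), Dom_fill_broken_faster spring_map broken_spring_pattern → Spec_fill_broken_faster spring_map broken_spring_pattern (fill_broken_faster spring_map broken_spring_pattern)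

-- ===== LEMMAS AND PROOFS =====

-- Proof-side state machine: scan a '?'-free prefix, threading (remaining pattern, run);
-- none = A's break / B's dead branch.
def scan : List Char → List Int → Int → Option (List Int × Int)
  | [], p, r => some (p, r)
  | c :: cs, p, r =>
    if c = '#' then scan cs p (r + 1)
    else if c = '.' ∧ 0 < r then
      match p with
      | [] => none
      | q :: ps => if q ≠ r then none else scan cs ps 0
    else scan cs p r

-- the list of completed '#'-group lengths, starting with a current run of r
def grp : List Char → Int → List Int
  | [], r => if 0 < r then [r] else []
  | c :: cs, r =>
    if c = '#' then grp cs (r + 1)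
    else if c = '.' ∧ 0 < r then r :: grp cs 0
    else grp cs r

theorem mpLoop_eq_grp : ∀ (cs : List Char) (mp : List Int) (gc : Int), 0 ≤ gc →
    mpLoop cs mp (decide (0 < gc)) gc = mp ++ grp cs gc := by
  intro cs
  induction cs with
  | nil => intro mp gc h; simp [mpLoop, grp]; split_ifs <;> simp
  | cons c cs ih =>
    intro mp gc h
    by_cases hc : c = '#'
    · have h1 : (decide ((0:Int) < gc + 1)) = true := by simp; omega
      have ih' := ih mp (gc+1) (by omega)
      rw [h1] at ih'
      simpa [mpLoop, grp, hc] using ih'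
    · by_cases hd : c = '.' ∧ 0 < gc
      · have : (decide (0 < gc)) = true := by simp [hd.2]
        simp [mpLoop, grp, hd]
        have ih' := ih (mp ++ [gc]) 0 le_rfl
        rw [show (decide ((0:Int) < 0)) = false by simp] at ih'
        rw [ih']
        simp
      · simp [mpLoop, grp, hc]
        rw [if_neg, if_neg hd]
        · exact ih mp gc h
        · intro hcon
          exact hd ⟨hcon.1, by simpa using hcon.2⟩

theorem eq_check : ∀ (mp p : List Int), ((mp.length == p.length) && (mp.zip p).all (fun xy => xy.1 == xy.2)) = true ↔ mp = p := by
  intro mp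
  induction mp with
  | nil => intro p; cases p <;> simp
  | cons x xs ih =>
    intro p
    cases p with
    | nil => simp
    | cons y ys =>
      simp only [List.zip_cons_cons, List.all_cons, List.length_cons, Bool.and_eq_true,
        beq_iff_eq, List.cons.injEq, Nat.add_right_cancel_iff]
      rw [← ih ys]
      simp [Bool.and_eq_true, and_left_comm]

theorem matchesB_iff (cs : List Char) (p : List Int) :
    matchesB cs p = true ↔ grp cs 0 = p := by
  have h := mpLoop_eq_grp cs [] 0 le_rfl
  rw [show (decide ((0:Int) < 0)) = false by simp] at h
  unfold matchesB
  rw [h]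
  simpa using eq_check (grp cs 0) p

theorem loopA_eq : ∀ (u : List Char), '?' ∉ u →
    ∀ (pre v : List Char) (p : List Int) (pn : Nat) (gc : Int), 0 ≤ gc →
    loopA pre (u ++ '?' :: v) p pn (decide (0 < gc)) gc =
      (match scan u (p.drop pn) gc with
       | none => []
       | some _ => fillA ((pre ++ u) ++ '#' :: v) p ++ fillA ((pre ++ u) ++ '.' :: v) p) := by
  intro u
  induction u with
  | nil =>
    intro _ pre v p pn gc h
    rw [List.nil_append, loopA.eq_def]
    simp [scan]
  | cons c u ih =>
    intro hq pre v p pn gc h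
    have hc : c ≠ '?' := fun hx => hq (by simp [hx])
    have hu : '?' ∉ u := fun hx => hq (List.mem_cons_of_mem _ hx)
    rw [List.cons_append, loopA.eq_def]
    dsimp only
    simp only [scan]
    by_cases h1 : c = '#'
    · rw [if_pos h1, if_pos h1]
      have ih' := ih hu (pre ++ [c]) v p pn (gc + 1) (by omega)
      rw [show (decide ((0:Int) < gc + 1)) = true by simp; omega] at ih'
      simpa [List.append_assoc] using ih'
    · rw [if_neg h1, if_neg h1]
      by_cases h2 : c = '.' ∧ 0 < gc
      · rw [if_pos ⟨h2.1, by simp [h2.2]⟩, if_pos h2]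
        by_cases hlen : pn < p.length
        · have hdrop : p.drop pn = p[pn] :: p.drop (pn + 1) := List.drop_eq_getElem_cons hlen
          have hgd : p.getD pn 0 = p[pn] := List.getD_eq_getElem p 0 hlen
          rw [hdrop]
          dsimp only
          by_cases h3 : p[pn] ≠ gc
          · rw [if_pos (Or.inr (by rw [hgd]; omega)), if_pos h3]
          · have h3' : p[pn] = gc := not_not.mp h3
            rw [if_neg (by rw [hgd]; omega), if_neg (by omega)]
            have ih' := ih hu (pre ++ [c]) v p (pn + 1) 0 le_rfl
            rw [show (decide ((0:Int) < 0)) = false by simp] at ih'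
            simpa [List.append_assoc] using ih'
        · rw [if_pos (Or.inl (by omega)), List.drop_eq_nil_iff.mpr (by omega)]
      · have hcond : ¬(c = '.' ∧ (decide (0 < gc)) = true) := by
          intro hx; exact h2 ⟨hx.1, by simpa using hx.2⟩
        rw [if_neg hcond, if_neg hc, if_neg h2]
        have ih' := ih hu (pre ++ [c]) v p pn gc h
        simpa [List.append_assoc] using ih'

theorem first_qmark : ∀ (cs : List Char), '?' ∈ cs → ∃ u v, cs = u ++ '?' :: v ∧ '?' ∉ u := by
  intro cs
  induction cs with
  | nil => simp
  | cons c cs ih =>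
    intro h
    by_cases hc : c = '?'
    · exact ⟨[], cs, by simp [hc], by simp⟩
    · obtain ⟨u, v, h1, h2⟩ := ih ((List.mem_cons.mp h).resolve_left (fun hx => hc hx.symm))
      exact ⟨c :: u, v, by simp [h1], by
        simp only [List.mem_cons, not_or]
        exact ⟨fun hx => hc hx.symm, h2⟩⟩

theorem scanSeg_append_no_q : ∀ (w : List Char), '?' ∉ w →
    ∀ (p : List Int) (r : Int) (z : List Char),
    scanSeg (w ++ z) p r =
      (match scan w p r with
       | none => none
       | some pr => (scanSeg z pr.1 pr.2).map (fun x => (w ++ x.1, x.2))) := by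
  intro w
  induction w with
  | nil =>
    intro _ p r z
    simp only [List.nil_append, scan]
    cases scanSeg z p r <;> simp
  | cons c w ih =>
    intro hq p r z
    have hc : c ≠ '?' := fun hx => hq (by simp [hx])
    have hw : '?' ∉ w := fun hx => hq (List.mem_cons_of_mem _ hx)
    rw [List.cons_append, scanSeg.eq_def]
    dsimp only
    simp only [scan]
    rw [if_neg hc]
    by_cases h1 : c = '#'
    · rw [if_pos h1, if_pos h1, ih hw p (r + 1) z]
      cases scan w p (r + 1) with
      | none => simp
      | some pr =>
        dsimp only
        cases scanSeg z pr.1 pr.2 <;> simp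
    · rw [if_neg h1, if_neg h1]
      by_cases h2 : c = '.' ∧ 0 < r
      · rw [if_pos h2, if_pos h2]
        cases p with
        | nil => simp
        | cons q ps =>
          dsimp only
          by_cases h3 : q ≠ r
          · simp [h3]
          · rw [if_neg h3, if_neg h3, ih hw ps 0 z]
            cases scan w ps 0 with
            | none => simp
            | some pr =>
              dsimp only
              cases scanSeg z pr.1 pr.2 <;> simp
      · rw [if_neg h2, if_neg h2, ih hw p r z]
        cases scan w p r with
        | none => simp
        | some pr =>
          dsimp only
          cases scanSeg z pr.1 pr.2 <;> simp

theorem goB_unfold (cs : List Char) (p : List Int) (r : Int) :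
    goB cs p r =
      (match scanSeg cs p r with
       | none => []
       | some (seg, [], pat', run') =>
         if run' > 0 then (if pat' = [run'] then [seg] else [])
         else (if pat' = [] then [seg] else [])
       | some (seg, _ :: rest', pat', run') =>
         (stepB '#' rest' pat' run').map (fun t => seg ++ '#' :: t) ++
         (stepB '.' rest' pat' run').map (fun t => seg ++ '.' :: t)) := by
  rw [goB.eq_def]
  split <;> (rename_i heq; rw [heq])

theorem scanSeg_no_q (cs : List Char) (h : '?' ∉ cs) (p : List Int) (r : Int) :
    scanSeg cs p r = (scan cs p r).map (fun pr => (cs, ([] : List Char), pr.1, pr.2)) := by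
  have h2 := scanSeg_append_no_q cs h p r []
  rw [List.append_nil] at h2
  rw [h2]
  cases scan cs p r <;> simp [scanSeg]

theorem scanSeg_split (u : List Char) (h : '?' ∉ u) (p : List Int) (r : Int) (v : List Char) :
    scanSeg (u ++ '?' :: v) p r = (scan u p r).map (fun pr => (u, '?' :: v, pr.1, pr.2)) := by
  rw [scanSeg_append_no_q u h p r ('?' :: v)]
  cases scan u p r <;> simp [scanSeg]

theorem scan_accept : ∀ (cs : List Char) (p : List Int) (r : Int) (X : List Char),
    (match scan cs p r with
     | none => ([] : List (List Char))
     | some pr =>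
       if pr.2 > 0 then (if pr.1 = [pr.2] then [X] else [])
       else (if pr.1 = [] then [X] else []))
    = if grp cs r = p then [X] else [] := by
  intro cs
  induction cs with
  | nil =>
    intro p r X
    simp only [scan, grp]
    by_cases hr : 0 < r
    · simp only [if_pos hr]
      split_ifs <;> simp_all [eq_comm]
    · simp only [if_neg hr]
      split_ifs <;> simp_all [eq_comm]
  | cons c cs ih =>
    intro p r X
    simp only [scan]
    by_cases h1 : c = '#'
    · have hg : grp (c :: cs) r = grp cs (r + 1) := by simp [grp, h1]
      rw [if_pos h1, hg]; exact ih p (r + 1) X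
    · rw [if_neg h1]
      by_cases h2 : c = '.' ∧ 0 < r
      · have hg : grp (c :: cs) r = r :: grp cs 0 := by simp [grp, h2]
        rw [if_pos h2, hg]
        cases p with
        | nil => simp
        | cons q ps =>
          dsimp only
          by_cases h3 : q ≠ r
          · rw [if_pos h3]
            rw [if_neg (fun hx : r :: grp cs 0 = q :: ps => h3 (by injection hx; omega))]
          · have h3' : q = r := not_not.mp h3
            subst h3'
            rw [if_neg h3, ih ps 0 X]
            split_ifs with h4 h5 h5 <;> simp_all
      · have hg : grp (c :: cs) r = grp cs r := by
          simp only [grp]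
          rw [if_neg h1, if_neg h2]
        rw [if_neg h2, hg]; exact ih p r X

theorem goB_leaf (cs : List Char) (h : '?' ∉ cs) (p : List Int) (r : Int) :
    goB cs p r = if grp cs r = p then [cs] else [] := by
  rw [goB_unfold, scanSeg_no_q cs h p r, ← scan_accept cs p r cs]
  cases scan cs p r with
  | none => rfl
  | some pr => rfl

theorem goB_append (w : List Char) (hw : '?' ∉ w) (p : List Int) (r : Int) (z : List Char) :
    goB (w ++ z) p r =
      (match scan w p r with
       | none => []
       | some pr => (goB z pr.1 pr.2).map (w ++ ·)) := by
  rw [goB_unfold, scanSeg_append_no_q w hw p r z]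
  cases scan w p r with
  | none => rfl
  | some pr =>
    dsimp only
    rw [goB_unfold z]
    cases hsz : scanSeg z pr.1 pr.2 with
    | none => simp
    | some x =>
      obtain ⟨seg, rest, pat', run'⟩ := x
      cases rest with
      | nil =>
        dsimp only
        split_ifs <;> simp_all
      | cons hd rest' =>
        dsimp only
        simp [List.map_map, Function.comp_def, List.map_append, List.append_assoc]

theorem goB_cons_hash (v : List Char) (p : List Int) (r : Int) :
    goB ('#' :: v) p r = (stepB '#' v p r).map ('#' :: ·) := by
  have h := goB_append ['#'] (by decide) p r v
  rw [show (['#'] ++ v : List Char) = '#' :: v from rfl] at h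
  rw [h, show scan ['#'] p r = some (p, r + 1) from by simp [scan], stepB.eq_def]
  simp

theorem goB_cons_dot (v : List Char) (p : List Int) (r : Int) :
    goB ('.' :: v) p r = (stepB '.' v p r).map ('.' :: ·) := by
  have h := goB_append ['.'] (by decide) p r v
  rw [show (['.'] ++ v : List Char) = '.' :: v from rfl] at h
  rw [h, stepB.eq_def, if_neg (by decide)]
  by_cases hr : 0 < r
  · rw [if_pos hr,
      show scan ['.'] p r =
        (match p with
         | [] => none
         | q :: ps => if q ≠ r then none else some (ps, 0)) from by
      simp only [scan]
      rw [if_neg (by decide), if_pos (by simp [hr])]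
      cases p <;> simp]
    cases p with
    | nil => simp
    | cons q ps =>
      dsimp only
      by_cases h3 : q ≠ r
      · simp [h3]
      · simp [h3]
  · rw [if_neg hr,
      show scan ['.'] p r = some (p, r) from by
        simp only [scan]
        rw [if_neg (by decide), if_neg (by simp [hr])]]
    simp

theorem fillA_eq_goB : ∀ (cs : List Char) (p : List Int),
    fillA cs p = (goB cs p 0).map String.ofList := by
  suffices H : ∀ (n : Nat) (cs : List Char) (p : List Int), List.count '?' cs = n →
      fillA cs p = (goB cs p 0).map String.ofList by
    intro cs p; exact H _ cs p rfl
  intro n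
  induction n using Nat.strong_induction_on with
  | _ n IH =>
    intro cs p hn
    by_cases hq : '?' ∈ cs
    · obtain ⟨u, v, rfl, hu⟩ := first_qmark cs hq
      rw [fillA, if_neg (not_not_intro hq)]
      have hl := loopA_eq u hu [] v p 0 0 le_rfl
      rw [show (decide ((0:Int) < 0)) = false by simp] at hl
      simp only [List.nil_append, List.drop_zero] at hl
      rw [goB_unfold, scanSeg_split u hu p 0 v]
      cases hs : scan u p 0 with
      | none =>
        rw [hs] at hl
        rw [hl]
        simp
      | some pr =>
        rw [hs] at hl
        rw [hl]
        dsimp only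
        have hcnt : ∀ c : Char, c ≠ '?' → List.count '?' (u ++ c :: v) < n := by
          intro c hc
          subst hn
          simp [List.count_append, hc]
        rw [IH _ (hcnt '#' (by decide)) (u ++ '#' :: v) p rfl,
            IH _ (hcnt '.' (by decide)) (u ++ '.' :: v) p rfl,
            goB_append u hu p 0 ('#' :: v), hs,
            goB_append u hu p 0 ('.' :: v), hs]
        dsimp only
        rw [goB_cons_hash v pr.1 pr.2, goB_cons_dot v pr.1 pr.2]
        simp [List.map_map, Function.comp_def]
    · rw [fillA, if_pos hq, goB_leaf cs hq p 0]
      have hiff := matchesB_iff cs p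
      split_ifs with h1 h2 h2 <;> simp_all

-- ===== VERDICT (by name: the statement is the Claim_ definition above) =====
theorem fill_broken_faster_spec : Claim_equal_fill_broken_faster := by
  intro s p _
  unfold Spec_fill_broken_faster fill_broken_faster fill_broken_faster_alt
  exact fillA_eq_goB s.toList p
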